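-- pv_equiv track=rewrite | github.com/sworrl/Gattrose-NG | src/utils/mac_vendor.py | _identify_client
-- ===== SOURCE A (Python) =====
-- from typing import Dict, Tuple, Optional
--
-- def _identify_client(vendor: str, probed_ssids: list, signal_strength: str) -> Tuple[str, int]:
--     """Identify client device type"""
--
--     probed_lower = [ssid.lower() for ssid in probed_ssids if ssid]
--
--     # Apple devices
--     if 'Apple' in vendor:
--         # Check for specific device indicators
--         for ssid in probed_lower:
--             if 'iphone' in ssid:
--                 return "Apple iPhone", 85
--             elif 'ipad' in ssid:
--                 return "Apple iPad", 85
--             elif 'macbook' in ssid or 'mac' in ssid: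
--                 return "Apple MacBook/iMac", 80
--             elif 'watch' in ssid:
--                 return "Apple Watch", 75
--         # Default Apple device
--         return "Apple iOS/macOS Device", 70
--
--     # Amazon devices
--     elif 'Amazon' in vendor:
--         if 'Echo' in vendor:
--             return "Amazon Echo/Alexa", 90
--         elif 'Fire' in vendor:
--             return "Amazon Fire Tablet/TV", 85
--         return "Amazon Smart Device", 75
--
--     # Google devices
--     elif 'Google' in vendor:
--         if 'Nest' in vendor:
--             return "Google Nest Device", 85
--         for ssid in probed_lower:
--             if 'android' in ssid or 'pixel' in ssid:
--                 return "Google Pixel Phone", 80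
--         return "Google/Android Device", 70
--
--     # Samsung devices
--     elif 'Samsung' in vendor:
--         for ssid in probed_lower:
--             if 'galaxy' in ssid or 'samsung' in ssid:
--                 return "Samsung Galaxy Phone/Tablet", 80
--             elif 'tv' in ssid or 'smart' in ssid:
--                 return "Samsung Smart TV", 75
--         return "Samsung Device", 70
--
--     # Sonos
--     elif 'Sonos' in vendor:
--         return "Sonos Speaker", 95
--
--     # Ring
--     elif 'Ring' in vendor:
--         return "Ring Doorbell/Camera", 90
--
--     # Raspberry Pi
--     elif 'Raspberry Pi' in vendor:
--         return "Raspberry Pi", 90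
--
--     # Intel (likely laptop WiFi card)
--     elif 'Intel' in vendor:
--         return "Laptop/PC (Intel WiFi)", 75
--
--     # Check probed SSIDs for hints
--     for ssid in probed_lower:
--         if 'printer' in ssid or 'hp' in ssid or 'epson' in ssid or 'canon' in ssid:
--             return "Network Printer", 70
--         elif 'camera' in ssid or 'cam' in ssid:
--             return "Security Camera", 65
--         elif 'tv' in ssid or 'roku' in ssid or 'chromecast' in ssid:
--             return "Smart TV/Streaming Device", 70
--         elif 'thermostat' in ssid or 'nest' in ssid or 'ecobee' in ssid:
--             return "Smart Thermostat", 70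
--         elif 'xbox' in ssid or 'playstation' in ssid or 'ps4' in ssid or 'ps5' in ssid:
--             return "Gaming Console", 75
--         elif 'nintendo' in ssid or 'switch' in ssid:
--             return "Nintendo Switch", 80
--
--     # Fallback based on vendor
--     if vendor != 'Unknown':
--         return f"{vendor} Device", 60
--
--     return "Unknown WiFi Device", 30
-- ===== SOURCE B (Python) =====
-- # Generate-then-select re-implementation: instead of early-return scanning chains,
-- # build the complete list of (ssid_index, rule_index, label, score) matches and
-- # select the minimum by priority key; vendor dispatch is a find over a rule table.
--
-- _APPLE = [(('iphone',), 'Apple iPhone', 85),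
--           (('ipad',), 'Apple iPad', 85),
--           (('macbook', 'mac'), 'Apple MacBook/iMac', 80),
--           (('watch',), 'Apple Watch', 75)]
-- _GOOGLE = [(('android', 'pixel'), 'Google Pixel Phone', 80)]
-- _SAMSUNG = [(('galaxy', 'samsung'), 'Samsung Galaxy Phone/Tablet', 80),
--             (('tv', 'smart'), 'Samsung Smart TV', 75)]
-- _GENERIC = [(('printer', 'hp', 'epson', 'canon'), 'Network Printer', 70),
--             (('camera', 'cam'), 'Security Camera', 65),
--             (('tv', 'roku', 'chromecast'), 'Smart TV/Streaming Device', 70),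
--             (('thermostat', 'nest', 'ecobee'), 'Smart Thermostat', 70),
--             (('xbox', 'playstation', 'ps4', 'ps5'), 'Gaming Console', 75),
--             (('nintendo', 'switch'), 'Nintendo Switch', 80)]
--
-- # (vendor_substring, vendor_subrules, ssid_rules, default_result), priority order
-- _VENDORS = [('Apple', [], _APPLE, ('Apple iOS/macOS Device', 70)),
--             ('Amazon', [('Echo', 'Amazon Echo/Alexa', 90),
--                         ('Fire', 'Amazon Fire Tablet/TV', 85)], [], ('Amazon Smart Device', 75)),
--             ('Google', [('Nest', 'Google Nest Device', 85)], _GOOGLE, ('Google/Android Device', 70)),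
--             ('Samsung', [], _SAMSUNG, ('Samsung Device', 70)),
--             ('Sonos', [], [], ('Sonos Speaker', 95)),
--             ('Ring', [], [], ('Ring Doorbell/Camera', 90)),
--             ('Raspberry Pi', [], [], ('Raspberry Pi', 90)),
--             ('Intel', [], [], ('Laptop/PC (Intel WiFi)', 75))]
--
--
-- def _best_ssid_match(ssids, rules):
--     """All keyword hits over the ssids x rules cross product; pick the highest-priority one."""
--     cands = [(i, j, label, score)
--              for i, s in enumerate(ssids)
--              for j, (kws, label, score) in enumerate(rules)
--              if any(kw in s for kw in kws)]
--     if not cands: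
--         return None
--     _, _, label, score = min(cands, key=lambda t: (t[0], t[1]))
--     return label, score
--
--
-- def _identify_client(vendor, probed_ssids, signal_strength):
--     ssids = [s.lower() for s in probed_ssids if s]
--     entry = next((e for e in _VENDORS if e[0] in vendor), None)
--     if entry is not None:
--         _, subrules, ssid_rules, default = entry
--         sub = next(((label, score) for vsub, label, score in subrules if vsub in vendor), None)
--         if sub is not None:
--             return sub
--         return _best_ssid_match(ssids, ssid_rules) or default
--     hit = _best_ssid_match(ssids, _GENERIC)
--     if hit is not None:
--         return hit
--     if vendor != 'Unknown':
--         return f"{vendor} Device", 60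
--     return 'Unknown WiFi Device', 30
-- ===== Notes on version B (the rewrite author's own statement) =====
-- stated objective: alternative
-- what changed: Replaced A's early-return if/elif chains and nested scanning loops by a generate-then-select classifier: the full list of (ssid_index, rule_index, label, score) keyword hits over the ssids x rules cross product is built by one comprehension and the winner selected with min by the (ssid_index, rule_index) priority key, with vendor dispatch as a find over an ordered rule table.
import Mathlib
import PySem

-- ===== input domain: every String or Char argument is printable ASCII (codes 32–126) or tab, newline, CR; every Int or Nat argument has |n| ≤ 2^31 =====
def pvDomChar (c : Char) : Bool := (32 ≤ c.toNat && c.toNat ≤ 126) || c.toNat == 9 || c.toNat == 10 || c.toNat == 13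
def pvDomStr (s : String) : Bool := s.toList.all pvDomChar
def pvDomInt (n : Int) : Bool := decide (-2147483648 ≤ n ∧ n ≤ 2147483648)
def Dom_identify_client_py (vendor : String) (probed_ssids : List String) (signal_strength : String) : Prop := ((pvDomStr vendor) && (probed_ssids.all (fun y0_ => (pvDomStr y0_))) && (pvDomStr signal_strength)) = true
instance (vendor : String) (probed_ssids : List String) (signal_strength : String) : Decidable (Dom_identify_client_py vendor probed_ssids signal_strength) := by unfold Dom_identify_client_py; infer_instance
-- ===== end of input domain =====

-- B replaces A's early-return scanning chains by a generate-then-select classifier: it builds the full (ssid_index, rule_index) candidate list over a rule table and picks the minimum by priority key; objective: alternative algorithm, same cost.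


-- ===== PORT A =====
-- A's four in-function 'for ssid in probed_lower' loops, each returning on first hit (none = fell through)
def appleLoopA : List String → Option (String × Int)
  | [] => none
  | s :: rest =>
    if PySem.Str.isIn "iphone" s then some ("Apple iPhone", 85)
    else if PySem.Str.isIn "ipad" s then some ("Apple iPad", 85)
    else if PySem.Str.isIn "macbook" s || PySem.Str.isIn "mac" s then some ("Apple MacBook/iMac", 80)
    else if PySem.Str.isIn "watch" s then some ("Apple Watch", 75)
    else appleLoopA rest

def googleLoopA : List String → Option (String × Int)
  | [] => none
  | s :: rest =>
    if PySem.Str.isIn "android" s || PySem.Str.isIn "pixel" s then some ("Google Pixel Phone", 80)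
    else googleLoopA rest

def samsungLoopA : List String → Option (String × Int)
  | [] => none
  | s :: rest =>
    if PySem.Str.isIn "galaxy" s || PySem.Str.isIn "samsung" s then some ("Samsung Galaxy Phone/Tablet", 80)
    else if PySem.Str.isIn "tv" s || PySem.Str.isIn "smart" s then some ("Samsung Smart TV", 75)
    else samsungLoopA rest

def genericLoopA : List String → Option (String × Int)
  | [] => none
  | s :: rest =>
    if PySem.Str.isIn "printer" s || PySem.Str.isIn "hp" s || PySem.Str.isIn "epson" s || PySem.Str.isIn "canon" s then some ("Network Printer", 70)
    else if PySem.Str.isIn "camera" s || PySem.Str.isIn "cam" s then some ("Security Camera", 65)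
    else if PySem.Str.isIn "tv" s || PySem.Str.isIn "roku" s || PySem.Str.isIn "chromecast" s then some ("Smart TV/Streaming Device", 70)
    else if PySem.Str.isIn "thermostat" s || PySem.Str.isIn "nest" s || PySem.Str.isIn "ecobee" s then some ("Smart Thermostat", 70)
    else if PySem.Str.isIn "xbox" s || PySem.Str.isIn "playstation" s || PySem.Str.isIn "ps4" s || PySem.Str.isIn "ps5" s then some ("Gaming Console", 75)
    else if PySem.Str.isIn "nintendo" s || PySem.Str.isIn "switch" s then some ("Nintendo Switch", 80)
    else genericLoopA rest

def identify_client_py (vendor : String) (probed_ssids : List String) (signal_strength : String) : String × Int :=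
  let probed_lower := (probed_ssids.filter (fun ssid => !(ssid == ""))).map PySem.Str.lower
  if PySem.Str.isIn "Apple" vendor then
    (appleLoopA probed_lower).getD ("Apple iOS/macOS Device", 70)
  else if PySem.Str.isIn "Amazon" vendor then
    if PySem.Str.isIn "Echo" vendor then ("Amazon Echo/Alexa", 90)
    else if PySem.Str.isIn "Fire" vendor then ("Amazon Fire Tablet/TV", 85)
    else ("Amazon Smart Device", 75)
  else if PySem.Str.isIn "Google" vendor then
    if PySem.Str.isIn "Nest" vendor then ("Google Nest Device", 85)
    else (googleLoopA probed_lower).getD ("Google/Android Device", 70)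
  else if PySem.Str.isIn "Samsung" vendor then
    (samsungLoopA probed_lower).getD ("Samsung Device", 70)
  else if PySem.Str.isIn "Sonos" vendor then ("Sonos Speaker", 95)
  else if PySem.Str.isIn "Ring" vendor then ("Ring Doorbell/Camera", 90)
  else if PySem.Str.isIn "Raspberry Pi" vendor then ("Raspberry Pi", 90)
  else if PySem.Str.isIn "Intel" vendor then ("Laptop/PC (Intel WiFi)", 75)
  else
    match genericLoopA probed_lower with
    | some r => r
    | none =>
      if vendor ≠ "Unknown" then (PySem.Str.join "" [vendor, " Device"], 60)
      else ("Unknown WiFi Device", 30)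

-- ===== PORT B =====
-- Source B's rule tables: SSID rules are (keywords, label, score); vendor rules are
-- (vendor_substring, vendor_subrules, ssid_rules, default_result), in priority order.
def appleRulesB : List (List String × String × Int) :=
  [(["iphone"], "Apple iPhone", 85), (["ipad"], "Apple iPad", 85),
   (["macbook", "mac"], "Apple MacBook/iMac", 80), (["watch"], "Apple Watch", 75)]

def googleRulesB : List (List String × String × Int) :=
  [(["android", "pixel"], "Google Pixel Phone", 80)]

def samsungRulesB : List (List String × String × Int) :=
  [(["galaxy", "samsung"], "Samsung Galaxy Phone/Tablet", 80),
   (["tv", "smart"], "Samsung Smart TV", 75)]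

def genericRulesB : List (List String × String × Int) :=
  [(["printer", "hp", "epson", "canon"], "Network Printer", 70),
   (["camera", "cam"], "Security Camera", 65),
   (["tv", "roku", "chromecast"], "Smart TV/Streaming Device", 70),
   (["thermostat", "nest", "ecobee"], "Smart Thermostat", 70),
   (["xbox", "playstation", "ps4", "ps5"], "Gaming Console", 75),
   (["nintendo", "switch"], "Nintendo Switch", 80)]

def vendorRulesB : List (String × List (String × String × Int) × List (List String × String × Int) × (String × Int)) :=
  [("Apple", [], appleRulesB, ("Apple iOS/macOS Device", 70)),
   ("Amazon", [("Echo", "Amazon Echo/Alexa", 90), ("Fire", "Amazon Fire Tablet/TV", 85)], [], ("Amazon Smart Device", 75)),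
   ("Google", [("Nest", "Google Nest Device", 85)], googleRulesB, ("Google/Android Device", 70)),
   ("Samsung", [], samsungRulesB, ("Samsung Device", 70)),
   ("Sonos", [], [], ("Sonos Speaker", 95)),
   ("Ring", [], [], ("Ring Doorbell/Camera", 90)),
   ("Raspberry Pi", [], [], ("Raspberry Pi", 90)),
   ("Intel", [], [], ("Laptop/PC (Intel WiFi)", 75))]

-- inner part of the candidate comprehension of _best_ssid_match: the (i, j, label, score) hits of one ssid
def blockB (rules : List (List String × String × Int)) (p : Int × String) : List (Int × Int × String × Int) :=
  (PySem.List.enumerate rules).filterMap (fun q =>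
    if q.2.1.any (fun kw => PySem.Str.isIn kw p.2) then some (p.1, q.1, q.2.2.1, q.2.2.2) else none)

-- the candidate comprehension: all (i, j, label, score) keyword hits over ssids x rules
def candB (ssids : List String) (rules : List (List String × String × Int)) : List (Int × Int × String × Int) :=
  (PySem.List.enumerate ssids).flatMap (blockB rules)

-- _best_ssid_match: empty-check, then min(cands, key=lambda t: (t[0], t[1]))
def bestSsidB (ssids : List String) (rules : List (List String × String × Int)) : Option (String × Int) :=
  let cands := candB ssids rules
  if cands.isEmpty then none
  else (PySem.List.min2? cands (fun t => t.1) (fun t => t.2.1)).map (fun t => (t.2.2.1, t.2.2.2))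

def identify_client_py_alt (vendor : String) (probed_ssids : List String) (signal_strength : String) : String × Int :=
  let ssids := (probed_ssids.filter (fun s => !(s == ""))).map PySem.Str.lower
  -- next((e for e in _VENDORS if e[0] in vendor), None)
  match vendorRulesB.find? (fun e => PySem.Str.isIn e.1 vendor) with
  | some (_, subrules, ssid_rules, dflt) =>
    -- next(((label, score) for vsub, label, score in subrules if vsub in vendor), None)
    match subrules.find? (fun r => PySem.Str.isIn r.1 vendor) with
    | some (_, label, score) => (label, score)
    | none => (bestSsidB ssids ssid_rules).getD dflt  -- 'x or default': x is None or a 2-tuple (always truthy), so this is exact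
  | none =>
    match bestSsidB ssids genericRulesB with
    | some r => r
    | none =>
      if vendor ≠ "Unknown" then (PySem.Str.join "" [vendor, " Device"], 60)
      else ("Unknown WiFi Device", 30)

-- ===== PRECONDITION & SPEC =====
def Spec_identify_client_py (vendor : String) (probed_ssids : List String) (signal_strength : String) (out : String × Int) : Prop := out = identify_client_py_alt vendor probed_ssids signal_strength
instance (vendor : String) (probed_ssids : List String) (signal_strength : String) (out : String × Int) : Decidable (Spec_identify_client_py vendor probed_ssids signal_strength out) := by unfold Spec_identify_client_py; infer_instance

-- ===== CLAIM (what is proved, stated in full; the proofs are below) =====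
def Claim_equal_identify_client_py : Prop := ∀ (vendor : String) (probed_ssids : List String) (signal_strength : String), Dom_identify_client_py vendor probed_ssids signal_strength → Spec_identify_client_py vendor probed_ssids signal_strength (identify_client_py vendor probed_ssids signal_strength)

-- ===== LEMMAS AND PROOFS =====
-- Proof-side first-match scanner (the common contract of A's loops and B's argmin selection)
def ruleHitP (s : String) : List (List String × String × Int) → Option (String × Int)
  | [] => none
  | (kws, label, score) :: rs =>
    if kws.any (fun kw => PySem.Str.isIn kw s) then some (label, score) else ruleHitP s rs

def scanP (rules : List (List String × String × Int)) : List String → Option (String × Int)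
  | [] => none
  | s :: rest =>
    match ruleHitP s rules with
    | some r => some r
    | none => scanP rules rest

-- strict lexicographic order on the (ssid_index, rule_index) key
def lexLt (a b : Int × Int × String × Int) : Prop := a.1 < b.1 ∨ (a.1 = b.1 ∧ a.2.1 < b.2.1)

theorem foldl_min_stays (f : Option (Int × Int × String × Int) → (Int × Int × String × Int) → Option (Int × Int × String × Int))
    (hf : ∀ m x, lexLt m x → f (some m) x = some m) :
    ∀ (cs : List (Int × Int × String × Int)) (c : Int × Int × String × Int),
      (∀ x ∈ cs, lexLt c x) → cs.foldl f (some c) = some c := by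
  intro cs
  induction cs with
  | nil => intro c _; rfl
  | cons x cs ih =>
    intro c h
    rw [List.foldl_cons, hf c x (h x (by simp))]
    exact ih c (fun y hy => h y (by simp [hy]))

theorem min2_head (l : List (Int × Int × String × Int)) (h : l.Pairwise lexLt) :
    PySem.List.min2? l (fun t => t.1) (fun t => t.2.1) = l.head? := by
  cases l with
  | nil => rfl
  | cons c cs =>
    rw [List.head?_cons]
    simp only [PySem.List.min2?, List.foldl_cons]
    refine foldl_min_stays _ ?_ cs c (List.pairwise_cons.mp h).1
    intro m x hmx
    have hcond : (decide (x.1 < m.1) || !decide (m.1 < x.1) && decide (x.2.1 < m.2.1)) = false := by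
      rcases hmx with hlt | ⟨heq, hlt⟩ <;> simp <;> omega
    simp [hcond]

theorem mem_blockB_fst (rules : List (List String × String × Int)) (p : Int × String)
    (x : Int × Int × String × Int) (hx : x ∈ blockB rules p) : x.1 = p.1 := by
  rcases List.mem_filterMap.mp hx with ⟨q, _, hq⟩
  split at hq
  · obtain rfl := Option.some.inj hq; rfl
  · exact absurd hq (by simp)

theorem blockB_sorted (rules : List (List String × String × Int)) (p : Int × String) :
    List.Pairwise lexLt (blockB rules p) := by
  unfold blockB
  rw [List.pairwise_filterMap]
  refine (PySem.List.pairwise_lt_enumerate rules 0).imp ?_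
  intro q q' hlt b hb b' hb'
  split at hb
  · split at hb'
    · obtain rfl := Option.some.inj hb
      obtain rfl := Option.some.inj hb'
      right; exact ⟨rfl, hlt⟩
    · exact absurd hb' (by simp)
  · exact absurd hb (by simp)

theorem cand_sorted (rules : List (List String × String × Int)) (ssids : List String) (s : Int) :
    List.Pairwise lexLt ((PySem.List.enumerate ssids s).flatMap (blockB rules)) := by
  rw [List.pairwise_flatMap]
  refine ⟨fun p _ => blockB_sorted rules p, ?_⟩
  refine (PySem.List.pairwise_lt_enumerate ssids s).imp ?_
  intro p p' hlt x hx y hy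
  have hx1 := mem_blockB_fst rules p x hx
  have hy1 := mem_blockB_fst rules p' y hy
  left; omega

theorem head_block' (str : String) (rules : List (List String × String × Int)) (j i : Int) :
    Option.map (fun t => (t.2.2.1, t.2.2.2)) (((PySem.List.enumerate rules j).filterMap (fun q =>
      if q.2.1.any (fun kw => PySem.Str.isIn kw str) then some ((i : Int), q.1, q.2.2.1, q.2.2.2) else none)).head?)
    = ruleHitP str rules := by
  induction rules generalizing j with
  | nil => simp [PySem.List.enumerate_nil, ruleHitP]
  | cons r rs ih =>
    obtain ⟨kws, label, score⟩ := r
    rw [PySem.List.enumerate_cons, List.filterMap_cons]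
    simp only [ruleHitP]
    split_ifs <;> first | rfl | exact ih (j + 1)

theorem head_blockB (rules : List (List String × String × Int)) (i : Int) (str : String) :
    Option.map (fun t => (t.2.2.1, t.2.2.2)) ((blockB rules (i, str)).head?) = ruleHitP str rules :=
  head_block' str rules 0 i

theorem head_cand (rules : List (List String × String × Int)) (ssids : List String) (s : Int) :
    Option.map (fun t => (t.2.2.1, t.2.2.2)) (((PySem.List.enumerate ssids s).flatMap (blockB rules)).head?)
    = scanP rules ssids := by
  induction ssids generalizing s with
  | nil => simp [PySem.List.enumerate_nil, scanP]
  | cons str rest ih =>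
    rw [PySem.List.enumerate_cons, List.flatMap_cons, List.head?_append]
    have hb := head_blockB rules s str
    cases hr : ruleHitP str rules with
    | none =>
      rw [hr] at hb
      have hnil : (blockB rules (s, str)).head? = none := Option.map_eq_none_iff.mp hb
      rw [hnil, Option.none_or]
      simp only [scanP, hr]
      exact ih (s + 1)
    | some r =>
      rw [hr] at hb
      rcases Option.map_eq_some_iff.mp hb with ⟨it, hit, hpay⟩
      rw [hit, Option.some_or]
      simp only [scanP, hr, Option.map_some, hpay]

theorem bestSsid_eq_scan (ssids : List String) (rules : List (List String × String × Int)) :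
    bestSsidB ssids rules = scanP rules ssids := by
  unfold bestSsidB
  by_cases h : (candB ssids rules).isEmpty
  · have he : candB ssids rules = [] := List.isEmpty_iff.mp h
    have hc := head_cand rules ssids 0
    unfold candB at he
    rw [he] at hc
    simpa [h] using hc
  · have hsorted : List.Pairwise lexLt (candB ssids rules) := by
      unfold candB; exact cand_sorted rules ssids 0
    simp only [h, Bool.false_eq_true, if_false]
    rw [min2_head _ hsorted]
    unfold candB
    exact head_cand rules ssids 0

-- A's unrolled loops are the first-match scanner on the corresponding rule table
theorem scan_apple (ss : List String) : scanP appleRulesB ss = appleLoopA ss := by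
  induction ss with
  | nil => rfl
  | cons s rest ih =>
    simp only [scanP, ruleHitP, appleRulesB, List.any_cons, List.any_nil, Bool.or_false, appleLoopA]
    split_ifs <;> first | rfl | simpa only [appleRulesB] using ih

theorem scan_google (ss : List String) : scanP googleRulesB ss = googleLoopA ss := by
  induction ss with
  | nil => rfl
  | cons s rest ih =>
    simp only [scanP, ruleHitP, googleRulesB, List.any_cons, List.any_nil, Bool.or_false, googleLoopA]
    split_ifs <;> first | rfl | simpa only [googleRulesB] using ih

theorem scan_samsung (ss : List String) : scanP samsungRulesB ss = samsungLoopA ss := by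
  induction ss with
  | nil => rfl
  | cons s rest ih =>
    simp only [scanP, ruleHitP, samsungRulesB, List.any_cons, List.any_nil, Bool.or_false, samsungLoopA]
    split_ifs <;> first | rfl | simpa only [samsungRulesB] using ih

theorem scan_generic (ss : List String) : scanP genericRulesB ss = genericLoopA ss := by
  induction ss with
  | nil => rfl
  | cons s rest ih =>
    simp only [scanP, ruleHitP, genericRulesB, List.any_cons, List.any_nil, Bool.or_false,
      Bool.or_assoc, genericLoopA]
    split_ifs <;> first | rfl | simpa only [genericRulesB] using ih

theorem scan_empty (ss : List String) : scanP [] ss = none := by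
  induction ss with
  | nil => rfl
  | cons s rest ih => simpa [scanP, ruleHitP] using ih

-- ===== VERDICT (by name: the statement is the Claim_ definition above) =====
theorem identify_client_py_spec : Claim_equal_identify_client_py := by
  intro vendor probed_ssids signal_strength _
  unfold Spec_identify_client_py identify_client_py identify_client_py_alt vendorRulesB
  by_cases h1 : PySem.Str.isIn "Apple" vendor = true
  · simp_all [List.find?, bestSsid_eq_scan, scan_apple, scan_google, scan_samsung, scan_generic, scan_empty]
  · by_cases h2 : PySem.Str.isIn "Amazon" vendor = true
    · by_cases h2a : PySem.Str.isIn "Echo" vendor = true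
      · simp_all [List.find?, bestSsid_eq_scan, scan_apple, scan_google, scan_samsung, scan_generic, scan_empty]
      · by_cases h2b : PySem.Str.isIn "Fire" vendor = true
        · simp_all [List.find?, bestSsid_eq_scan, scan_apple, scan_google, scan_samsung, scan_generic, scan_empty]
        · simp_all [List.find?, bestSsid_eq_scan, scan_apple, scan_google, scan_samsung, scan_generic, scan_empty]
    · by_cases h3 : PySem.Str.isIn "Google" vendor = true
      · by_cases h3a : PySem.Str.isIn "Nest" vendor = true
        · simp_all [List.find?, bestSsid_eq_scan, scan_apple, scan_google, scan_samsung, scan_generic, scan_empty]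
        · simp_all [List.find?, bestSsid_eq_scan, scan_apple, scan_google, scan_samsung, scan_generic, scan_empty]
      · by_cases h4 : PySem.Str.isIn "Samsung" vendor = true
        · simp_all [List.find?, bestSsid_eq_scan, scan_apple, scan_google, scan_samsung, scan_generic, scan_empty]
        · by_cases h5 : PySem.Str.isIn "Sonos" vendor = true
          · simp_all [List.find?, bestSsid_eq_scan, scan_apple, scan_google, scan_samsung, scan_generic, scan_empty]
          · by_cases h6 : PySem.Str.isIn "Ring" vendor = true
            · simp_all [List.find?, bestSsid_eq_scan, scan_apple, scan_google, scan_samsung, scan_generic, scan_empty]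
            · by_cases h7 : PySem.Str.isIn "Raspberry Pi" vendor = true
              · simp_all [List.find?, bestSsid_eq_scan, scan_apple, scan_google, scan_samsung, scan_generic, scan_empty]
              · by_cases h8 : PySem.Str.isIn "Intel" vendor = true
                · simp_all [List.find?, bestSsid_eq_scan, scan_apple, scan_google, scan_samsung, scan_generic, scan_empty]
                · simp_all [List.find?, bestSsid_eq_scan, scan_apple, scan_google, scan_samsung, scan_generic, scan_empty]
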